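-- pv_equiv track=rewrite | github.com/Revi1337/BaekJoon-Coding-Test | 백준/Gold/4803. 트리/트리.py | solution
-- ===== SOURCE A (Python) =====
-- def solution(seq, N, M, E):
--
--     def find(n):
--         while n != parents[n]:
--             parents[n] = parents[parents[n]]
--             n = parents[n]
--         return n
--
--     def union(n1, n2):
--         r1, r2 = find(n1), find(n2)
--         if r1 < r2:
--             parents[r2] = r1
--         else:
--             parents[r1] = r2
--
--     parents = list(range(N + 1))
--     cyc = set()
--     for n1, n2 in E:
--         if find(n1) != find(n2):
--             union(n1, n2)
--         else:
--             cyc.add(n1)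
--             cyc.add(n2)
--
--     parents = [find(n) for n in range(N + 1)]
--     cyc_root = set(parents[cn] for cn in cyc)
--
--     ans = len(set(parents[1:]) - cyc_root)
--     if not ans:
--         return f'Case {seq}: No trees.'
--     return f'Case {seq}: There is one tree.' if ans == 1 else f'Case {seq}: A forest of {ans} trees.'
-- ===== SOURCE B (Python) =====
-- def solution(seq, N, M, E):
--     # Quick-find: component label per node, classes merged by relabelling the
--     # higher-labelled class (labels are class minima); cycle labels kept in `bad`.
--     comp = list(range(N + 1))
--     members = {i: [i] for i in range(N + 1)}
--     bad = set()
--     for u, v in E: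
--         cu, cv = comp[u], comp[v]
--         if cu == cv:
--             bad.add(cu)
--         else:
--             lo, hi = (cu, cv) if cu < cv else (cv, cu)
--             moved = members[hi]
--             for x in moved:
--                 comp[x] = lo
--             members[lo].extend(moved)
--             del members[hi]
--             if hi in bad:
--                 bad.discard(hi)
--                 bad.add(lo)
--     trees = len(set(comp[1:]) - bad)
--     if trees == 0:
--         return f'Case {seq}: No trees.'
--     if trees == 1:
--         return f'Case {seq}: There is one tree.'
--     return f'Case {seq}: A forest of {trees} trees.'
-- ===== Notes on version B (the rewrite author's own statement) =====
-- stated objective: alternative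
-- what changed: Replaces A's path-compressed union-find (parent forest, find/union, second find pass and root re-mapping of the cycle set) by a quick-find scheme: a component-label array relabelled via per-label member lists on each merge, with cycle labels tracked directly, so the final answer is read off the label array with no parent chasing.
-- outside the precondition, e.g. on solution(1, 1, 1, [(-1, -1)]): A returns 'Case 1: No trees.', B returns 'Case 1: No trees.'
import Mathlib
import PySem

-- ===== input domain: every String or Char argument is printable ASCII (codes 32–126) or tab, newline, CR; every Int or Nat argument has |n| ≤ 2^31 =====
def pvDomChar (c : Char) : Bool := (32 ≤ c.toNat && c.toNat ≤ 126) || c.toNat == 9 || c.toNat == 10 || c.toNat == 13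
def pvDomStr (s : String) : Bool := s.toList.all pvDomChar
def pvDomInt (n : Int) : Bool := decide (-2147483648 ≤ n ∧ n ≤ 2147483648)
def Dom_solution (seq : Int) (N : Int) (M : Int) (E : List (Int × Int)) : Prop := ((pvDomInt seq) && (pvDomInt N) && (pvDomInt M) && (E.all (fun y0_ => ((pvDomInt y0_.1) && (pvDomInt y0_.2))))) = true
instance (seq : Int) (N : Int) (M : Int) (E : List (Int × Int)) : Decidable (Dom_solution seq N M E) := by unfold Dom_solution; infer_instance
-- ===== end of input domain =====

-- B replaces A's path-compressed union-find by a quick-find component-label array with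
-- per-label member lists (relabel-on-merge) and direct cycle-label tracking: a genuinely
-- different data structure of similar cost, not claimed faster.

-- ===== PORT A =====
-- fuel-bounded transliteration of A's `find` (while-loop with path compression);
-- fuel = list length, always sufficient on Pre_ inputs (the chased index strictly decreases)
def pvFind : Nat → List Int → Int → List Int × Int
  | 0, p, n => (p, n)
  | f+1, p, n =>
    let pn := PySem.List.pyGetD p n 0
    if n ≠ pn then
      let p' := PySem.List.pySetD p n (PySem.List.pyGetD p pn 0)
      pvFind f p' (PySem.List.pyGetD p' n 0)
    else (p, n)

def pvUnion (p : List Int) (n1 n2 : Int) : List Int :=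
  let s1 := pvFind p.length p n1
  let s2 := pvFind s1.1.length s1.1 n2
  if s1.2 < s2.2 then PySem.List.pySetD s2.1 s2.2 s1.2 else PySem.List.pySetD s2.1 s1.2 s2.2

-- body of A's `for n1, n2 in E` loop (state: parents, cyc)
def pvStepA (st : List Int × PySem.Set Int) (e : Int × Int) : List Int × PySem.Set Int :=
  let s1 := pvFind st.1.length st.1 e.1
  let s2 := pvFind s1.1.length s1.1 e.2
  if s1.2 ≠ s2.2 then (pvUnion s2.1 e.1 e.2, st.2)
  else (s2.1, PySem.Set.add (PySem.Set.add st.2 e.1) e.2)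

def solution (seq : Int) (N : Int) (M : Int) (E : List (Int × Int)) : String :=
  let parents : List Int := PySem.List.pyRange 0 (N+1) 1
  let st := E.foldl pvStepA (parents, PySem.Set.empty)
  let pr := (PySem.List.pyRange 0 (N+1) 1).foldl (fun (acc : List Int × List Int) n =>
      let s := pvFind acc.1.length acc.1 n
      (s.1, acc.2 ++ [s.2])) (st.1, [])
  let parents2 := pr.2
  let cycRoot : PySem.Set Int := PySem.Set.ofList (st.2.map (fun cn => PySem.List.pyGetD parents2 cn 0))
  let ans : Int := PySem.Set.len (PySem.Set.diff (PySem.Set.ofList (PySem.List.slice parents2 (some 1) none)) cycRoot)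
  if ans = 0 then "Case " ++ PySem.Int.toStr seq ++ ": No trees."
  else if ans = 1 then "Case " ++ PySem.Int.toStr seq ++ ": There is one tree."
  else "Case " ++ PySem.Int.toStr seq ++ ": A forest of " ++ PySem.Int.toStr ans ++ " trees."

-- ===== PORT B =====
-- body of B's `for u, v in E` loop (state: comp, members, bad)
def pvStepB (st : List Int × PySem.Dict Int (List Int) × PySem.Set Int) (e : Int × Int) :
    List Int × PySem.Dict Int (List Int) × PySem.Set Int :=
  let cu := PySem.List.pyGetD st.1 e.1 0
  let cv := PySem.List.pyGetD st.1 e.2 0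
  if cu = cv then (st.1, st.2.1, PySem.Set.add st.2.2 cu)
  else
    let lo := if cu < cv then cu else cv
    let hi := if cu < cv then cv else cu
    let moved := st.2.1.getD hi []
    let comp' := moved.foldl (fun c x => PySem.List.pySetD c x lo) st.1
    let members' := (st.2.1.modify lo [] (fun l => l ++ moved)).erase hi
    let bad' := if PySem.Set.contains st.2.2 hi then PySem.Set.add (PySem.Set.discard st.2.2 hi) lo
                else st.2.2
    (comp', members', bad')

def solution_alt (seq : Int) (N : Int) (M : Int) (E : List (Int × Int)) : String :=
  let comp0 : List Int := PySem.List.pyRange 0 (N+1) 1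
  let members0 : PySem.Dict Int (List Int) :=
    (PySem.List.pyRange 0 (N+1) 1).foldl (fun d i => d.insert i [i]) PySem.Dict.empty
  let st := E.foldl pvStepB (comp0, members0, PySem.Set.empty)
  let trees : Int := PySem.Set.len (PySem.Set.diff (PySem.Set.ofList (PySem.List.slice st.1 (some 1) none)) st.2.2)
  if trees = 0 then "Case " ++ PySem.Int.toStr seq ++ ": No trees."
  else if trees = 1 then "Case " ++ PySem.Int.toStr seq ++ ": There is one tree."
  else "Case " ++ PySem.Int.toStr seq ++ ": A forest of " ++ PySem.Int.toStr trees ++ " trees."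

-- ===== PRECONDITION & SPEC =====
-- Pre_ excludes edge endpoints outside range(len(parents)) = [0, N]: there A either raises
-- IndexError or silently relies on Python's accidental negative-index wraparound.
def Pre_solution (seq : Int) (N : Int) (M : Int) (E : List (Int × Int)) : Prop :=
  ∀ e ∈ E, 0 ≤ e.1 ∧ e.1 ≤ N ∧ 0 ≤ e.2 ∧ e.2 ≤ N
instance (seq : Int) (N : Int) (M : Int) (E : List (Int × Int)) : Decidable (Pre_solution seq N M E) := by unfold Pre_solution; infer_instance
def pvWitness_solution : Int × Int × Int × (List (Int × Int)) := (7, 3, 2, [(1, 2), (3, 3)])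

def Spec_solution (seq : Int) (N : Int) (M : Int) (E : List (Int × Int)) (out : String) : Prop := out = solution_alt seq N M E
instance (seq : Int) (N : Int) (M : Int) (E : List (Int × Int)) (out : String) : Decidable (Spec_solution seq N M E out) := by unfold Spec_solution; infer_instance

-- ===== CLAIM (what is proved, stated in full; the proofs are below) =====
def Claim_equal_solution : Prop := ∀ (seq : Int) (N : Int) (M : Int) (E : List (Int × Int)), Dom_solution seq N M E → Pre_solution seq N M E → Spec_solution seq N M E (solution seq N M E)

-- ===== LEMMAS AND PROOFS =====


-- ---------- root function of a parent forest ----------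

def pvRootF : Nat → List Int → Nat → Nat
  | 0, _, i => i
  | f+1, p, i => if p.getD i 0 = (i : Int) then i else pvRootF f p (p.getD i 0).toNat

def pvRoot (p : List Int) (i : Nat) : Nat := pvRootF (i+1) p i

def pvForest (p : List Int) : Prop :=
  ∀ k, k < p.length → 0 ≤ p.getD k 0 ∧ p.getD k 0 ≤ (k : Int)

lemma pvParent_lt {p : List Int} (hF : pvForest p) {i : Nat} (hi : i < p.length)
    (hne : p.getD i 0 ≠ (i : Int)) : (p.getD i 0).toNat < i := by
  rcases hF i hi with ⟨h0, h1⟩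
  omega

lemma pvRootF_succ (f : Nat) (p : List Int) (i : Nat) :
    pvRootF (f+1) p i = if p.getD i 0 = (i : Int) then i else pvRootF f p (p.getD i 0).toNat := rfl

lemma pvRootF_congr {p : List Int} (hF : pvForest p) :
    ∀ f f' i, i < p.length → i < f → i < f' → pvRootF f p i = pvRootF f' p i := by
  intro f
  induction f with
  | zero => intro f' i _ hf _; omega
  | succ f ih =>
    intro f' i hi hf hf'
    cases f' with
    | zero => omega
    | succ f' =>
      rw [pvRootF_succ, pvRootF_succ]
      by_cases h : p.getD i 0 = (i : Int)
      · rw [if_pos h, if_pos h]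
      · have hj := pvParent_lt hF hi h
        rw [if_neg h, if_neg h]
        exact ih f' _ (by omega) (by omega) (by omega)
lemma pvRoot_eq {p : List Int} (hF : pvForest p) {i : Nat} (hi : i < p.length) :
    pvRoot p i = if p.getD i 0 = (i : Int) then i else pvRoot p (p.getD i 0).toNat := by
  show pvRootF (i+1) p i = _
  rw [pvRootF_succ]
  by_cases h : p.getD i 0 = (i : Int)
  · rw [if_pos h, if_pos h]
  · have hj := pvParent_lt hF hi h
    rw [if_neg h, if_neg h]
    exact pvRootF_congr hF i _ _ (by omega) (by omega) (by omega)
lemma pvRoot_spec {p : List Int} (hF : pvForest p) :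
    ∀ i, i < p.length →
      pvRoot p i ≤ i ∧ pvRoot p i < p.length ∧ p.getD (pvRoot p i) 0 = (pvRoot p i : Int) := by
  intro i
  induction i using Nat.strong_induction_on with
  | _ i ih =>
    intro hi
    rw [pvRoot_eq hF hi]
    by_cases h : p.getD i 0 = (i : Int)
    · simp only [if_pos h]
      exact ⟨le_rfl, hi, h⟩
    · have hj := pvParent_lt hF hi h
      simp only [if_neg h]
      rcases ih _ hj (by omega) with ⟨h1, h2, h3⟩
      exact ⟨by omega, h2, h3⟩

lemma pvRoot_parent {p : List Int} (hF : pvForest p) {i : Nat} (hi : i < p.length) :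
    pvRoot p ((p.getD i 0).toNat) = pvRoot p i := by
  by_cases h : p.getD i 0 = (i : Int)
  · rw [h]; simp
  · rw [pvRoot_eq hF hi, if_neg h]

lemma pvRoot_idem {p : List Int} (hF : pvForest p) {i : Nat} (hi : i < p.length) :
    pvRoot p (pvRoot p i) = pvRoot p i := by
  rcases pvRoot_spec hF i hi with ⟨h1, h2, h3⟩
  rw [pvRoot_eq hF h2, if_pos h3]

lemma pvGetD_set_eq (p : List Int) {i : Nat} (v : Int) (h : i < p.length) :
    (p.set i v).getD i 0 = v := by
  rw [List.getD_eq_getElem?_getD, List.getElem?_set_self (by omega)]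
  simp

lemma pvGetD_set_ne (p : List Int) {i k : Nat} (v : Int) (h : k ≠ i) :
    (p.set i v).getD k 0 = p.getD k 0 := by
  rw [List.getD_eq_getElem?_getD, List.getElem?_set_ne (by omega), ← List.getD_eq_getElem?_getD]

-- path-compression step preserves the forest shape and every root
lemma pvCompress {p : List Int} (hF : pvForest p) {i : Nat} (hi : i < p.length)
    (hne : p.getD i 0 ≠ (i : Int)) :
    pvForest (p.set i (p.getD (p.getD i 0).toNat 0)) ∧
    ∀ k, k < p.length → pvRoot (p.set i (p.getD (p.getD i 0).toNat 0)) k = pvRoot p k := by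
  set j := (p.getD i 0).toNat with hjdef
  have hj : j < i := pvParent_lt hF hi hne
  have hjlen : j < p.length := by omega
  set v := p.getD j 0 with hvdef
  rcases hF j hjlen with ⟨hv0, hv1⟩
  have hlen : (p.set i v).length = p.length := by simp
  have hqget : ∀ k : Nat, (p.set i v).getD k 0 = if k = i then v else p.getD k 0 := by
    intro k
    by_cases hk : k = i
    · subst hk; rw [if_pos rfl]; exact pvGetD_set_eq p v hi
    · rw [if_neg hk]; exact pvGetD_set_ne p v hk
  have hqF : pvForest (p.set i v) := by
    intro k hk
    rw [hqget k]
    by_cases hk' : k = i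
    · subst hk'; rw [if_pos rfl]; constructor
      · exact hv0
      · omega
    · rw [if_neg hk']; exact hF k (by omega)
  refine ⟨hqF, ?_⟩
  intro k
  induction k using Nat.strong_induction_on with
  | _ k ih =>
    intro hk
    rw [pvRoot_eq hqF (by omega), pvRoot_eq hF hk, hqget k]
    by_cases hki : k = i
    · subst hki
      rw [if_pos rfl, if_neg hne]
      have hvne : v ≠ (k : Int) := by omega
      rw [if_neg hvne]
      have hvk : v.toNat < k := by omega
      rw [ih v.toNat hvk (by omega)]
      exact pvRoot_parent hF hjlen
    · rw [if_neg hki]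
      by_cases hfix : p.getD k 0 = (k : Int)
      · rw [if_pos hfix, if_pos hfix]
      · rw [if_neg hfix, if_neg hfix]
        have := pvParent_lt hF hk hfix
        exact ih _ this (by omega)

-- `find` returns the root, keeps length/forest/roots
lemma pvFind_succ (f : Nat) (p : List Int) (n : Int) :
    pvFind (f+1) p n =
      if n ≠ PySem.List.pyGetD p n 0 then
        pvFind f (PySem.List.pySetD p n (PySem.List.pyGetD p (PySem.List.pyGetD p n 0) 0))
          (PySem.List.pyGetD (PySem.List.pySetD p n (PySem.List.pyGetD p (PySem.List.pyGetD p n 0) 0)) n 0)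
      else (p, n) := rfl

lemma pvFind_spec :
    ∀ (f : Nat) (p : List Int) (n : Nat), pvForest p → n < p.length → n < f →
      (pvFind f p (n : Int)).1.length = p.length ∧ pvForest (pvFind f p (n : Int)).1 ∧
      (∀ k, k < p.length → pvRoot (pvFind f p (n : Int)).1 k = pvRoot p k) ∧
      (pvFind f p (n : Int)).2 = (pvRoot p n : Int) := by
  intro f
  induction f with
  | zero => intro p n _ _ h; omega
  | succ f ih =>
    intro p n hF hn hf
    rw [pvFind_succ, PySem.List.pyGetD_natCast]
    by_cases h : p.getD n 0 = (n : Int)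
    · rw [if_neg (by omega)]
      refine ⟨rfl, hF, fun k _ => rfl, ?_⟩
      rw [pvRoot_eq hF hn, if_pos h]
    · rw [if_pos (by omega)]
      have h0 : 0 ≤ p.getD n 0 := (hF n hn).1
      have hveq : PySem.List.pyGetD p (p.getD n 0) 0 = p.getD (p.getD n 0).toNat 0 := by
        rw [← Int.toNat_of_nonneg h0, PySem.List.pyGetD_natCast, Int.toNat_of_nonneg h0]
      set j := (p.getD n 0).toNat with hjdef
      have hj : j < n := pvParent_lt hF hn h
      set v := p.getD j 0 with hvdef
      have hset : PySem.List.pySetD p (n : Int) (PySem.List.pyGetD p (p.getD n 0) 0) = p.set n v := by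
        rw [hveq, PySem.List.pySetD_natCast]
      rw [hset]
      rcases pvCompress hF hn h with ⟨hqF, hqroots⟩
      have hv0 : 0 ≤ v := (hF j (by omega)).1
      have hnext : PySem.List.pyGetD (p.set n v) (n : Int) 0 = ((v.toNat : Nat) : Int) := by
        rw [PySem.List.pyGetD_natCast, pvGetD_set_eq p v hn, Int.toNat_of_nonneg hv0]
      rw [hnext]
      have hvlt : v.toNat < n := by
        have := (hF j (by omega)).2
        omega
      have hlen : (p.set n v).length = p.length := by simp
      rcases ih (p.set n v) v.toNat hqF (by omega) (by omega) with ⟨l1, l2, l3, l4⟩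
      refine ⟨by rw [l1, hlen], l2, ?_, ?_⟩
      · intro k hk
        rw [l3 k (by omega), hqroots k hk]
      · rw [l4, hqroots v.toNat (by omega)]
        have e1 : pvRoot p v.toNat = pvRoot p j := by
          rw [hvdef]
          exact pvRoot_parent hF (by omega)
        have e2 : pvRoot p j = pvRoot p n := by
          rw [hjdef]
          exact pvRoot_parent hF hn
        rw [e1, e2]

-- pointing one root at another merges exactly the two classes
lemma pvSetRoot {p : List Int} (hF : pvForest p) {r1 r2 : Nat}
    (h1 : r1 < p.length) (h2 : r2 < p.length)
    (hr1 : p.getD r1 0 = (r1 : Int)) (hr2 : p.getD r2 0 = (r2 : Int)) (hlt : r1 < r2) :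
    pvForest (p.set r2 (r1 : Int)) ∧
    ∀ k, k < p.length →
      pvRoot (p.set r2 (r1 : Int)) k = if pvRoot p k = r2 then r1 else pvRoot p k := by
  have hget : ∀ k : Nat, (p.set r2 (r1 : Int)).getD k 0 = if k = r2 then (r1 : Int) else p.getD k 0 := by
    intro k
    by_cases hk : k = r2
    · subst hk; rw [if_pos rfl]; exact pvGetD_set_eq p _ h2
    · rw [if_neg hk]; exact pvGetD_set_ne p _ hk
  have hqF : pvForest (p.set r2 (r1 : Int)) := by
    intro k hk
    rw [List.length_set] at hk
    rw [hget k]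
    by_cases hk' : k = r2
    · subst hk'; rw [if_pos rfl]; omega
    · rw [if_neg hk']; exact hF k hk
  refine ⟨hqF, ?_⟩
  intro k
  induction k using Nat.strong_induction_on with
  | _ k ih =>
    intro hk
    by_cases hk2 : k = r2
    · subst hk2
      have hroot_k : pvRoot p k = k := by rw [pvRoot_eq hF hk, if_pos hr2]
      rw [hroot_k, if_pos rfl]
      rw [pvRoot_eq hqF (by simpa using hk), hget k, if_pos rfl,
        if_neg (show ¬((r1 : Int) = (k : Int)) by omega), Int.toNat_natCast]
      rw [pvRoot_eq hqF (by simpa using h1), hget r1,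
        if_neg (show ¬(r1 = k) by omega), if_pos hr1]
    · rw [pvRoot_eq hqF (by simpa using hk), hget k, if_neg hk2]
      by_cases hfix : p.getD k 0 = (k : Int)
      · have hroot_k : pvRoot p k = k := by rw [pvRoot_eq hF hk, if_pos hfix]
        rw [if_pos hfix, hroot_k, if_neg hk2]
      · rw [if_neg hfix]
        have hlt' := pvParent_lt hF hk hfix
        rw [ih _ hlt' (by omega), pvRoot_eq hF hk, if_neg hfix]

lemma pvUnion_spec {p : List Int} (hF : pvForest p) {a b : Nat}
    (ha : a < p.length) (hb : b < p.length) (hne : pvRoot p a ≠ pvRoot p b) :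
    (pvUnion p (a : Int) (b : Int)).length = p.length ∧
    pvForest (pvUnion p (a : Int) (b : Int)) ∧
    ∀ k, k < p.length →
      pvRoot (pvUnion p (a : Int) (b : Int)) k =
        if pvRoot p k = max (pvRoot p a) (pvRoot p b) then min (pvRoot p a) (pvRoot p b)
        else pvRoot p k := by
  rcases pvFind_spec p.length p a hF ha ha with ⟨f1len, f1F, f1roots, f1ret⟩
  set s1 := pvFind p.length p (a : Int) with hs1
  rcases pvFind_spec s1.1.length s1.1 b f1F (by omega) (by omega) with ⟨f2len, f2F, f2roots, f2ret⟩
  set s2 := pvFind s1.1.length s1.1 (b : Int) with hs2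
  have hrb : pvRoot s1.1 b = pvRoot p b := f1roots b hb
  have hlen2 : s2.1.length = p.length := by rw [f2len, f1len]
  have hroots2 : ∀ k, k < p.length → pvRoot s2.1 k = pvRoot p k := by
    intro k hk
    rw [f2roots k (by omega), f1roots k hk]
  set ra := pvRoot p a with hra
  set rb := pvRoot p b with hrbdef
  have hra_lt : ra < p.length := (pvRoot_spec hF a ha).2.1
  have hrb_lt : rb < p.length := (pvRoot_spec hF b hb).2.1
  have hfix_a : s2.1.getD ra 0 = (ra : Int) := by
    have hx : pvRoot s2.1 ra = ra := by
      rw [hroots2 ra hra_lt, hra, pvRoot_idem hF ha]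
    have := (pvRoot_spec f2F ra (by omega)).2.2
    rwa [hx] at this
  have hfix_b : s2.1.getD rb 0 = (rb : Int) := by
    have hx : pvRoot s2.1 rb = rb := by
      rw [hroots2 rb hrb_lt, hrbdef, pvRoot_idem hF hb]
    have := (pvRoot_spec f2F rb (by omega)).2.2
    rwa [hx] at this
  simp only [pvUnion, ← hs1, ← hs2]
  rw [f1ret, f2ret, hrb]
  by_cases hlt : ra < rb
  · rw [if_pos (by exact_mod_cast hlt)]
    rw [show PySem.List.pySetD s2.1 (rb : Int) (ra : Int) = s2.1.set rb (ra : Int) from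
      PySem.List.pySetD_natCast s2.1 rb (ra : Int)]
    rcases pvSetRoot f2F (by omega) (by omega) hfix_a hfix_b hlt with ⟨hsF, hsroots⟩
    refine ⟨by simp [hlen2], hsF, ?_⟩
    intro k hk
    rw [hsroots k (by omega), hroots2 k hk,
      show max ra rb = rb by omega, show min ra rb = ra by omega]
  · have hlt' : rb < ra := by omega
    rw [if_neg (by exact_mod_cast hlt)]
    rw [show PySem.List.pySetD s2.1 (ra : Int) (rb : Int) = s2.1.set ra (rb : Int) from
      PySem.List.pySetD_natCast s2.1 ra (rb : Int)]
    rcases pvSetRoot f2F (by omega) (by omega) hfix_b hfix_a hlt' with ⟨hsF, hsroots⟩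
    refine ⟨by simp [hlen2], hsF, ?_⟩
    intro k hk
    rw [hsroots k (by omega), hroots2 k hk,
      show max ra rb = ra by omega, show min ra rb = rb by omega]

-- ---------- B-side helpers ----------

lemma pvRelabel_spec :
    ∀ (moved : List Int) (c : List Int) (lo : Int),
      (∀ x ∈ moved, 0 ≤ x ∧ x < (c.length : Int)) →
      (moved.foldl (fun c x => PySem.List.pySetD c x lo) c).length = c.length ∧
      ∀ k : Nat, k < c.length →
        (moved.foldl (fun c x => PySem.List.pySetD c x lo) c).getD k 0 =
          if (k : Int) ∈ moved then lo else c.getD k 0 := by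
  intro moved
  induction moved with
  | nil =>
    intro c lo _
    exact ⟨rfl, fun k _ => by simp⟩
  | cons x xs ih =>
    intro c lo hb
    rcases hb x (by simp) with ⟨hx0, hx1⟩
    have hset : PySem.List.pySetD c x lo = c.set x.toNat lo := by
      rw [← Int.toNat_of_nonneg hx0, PySem.List.pySetD_natCast, Int.toNat_of_nonneg hx0]
    have hlen : (c.set x.toNat lo).length = c.length := by simp
    have hb' : ∀ y ∈ xs, 0 ≤ y ∧ y < ((c.set x.toNat lo).length : Int) := by
      intro y hy
      rw [hlen]
      exact hb y (by simp [hy])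
    rcases ih (c.set x.toNat lo) lo hb' with ⟨ihlen, ihget⟩
    simp only [List.foldl_cons, hset]
    refine ⟨by rw [ihlen, hlen], ?_⟩
    intro k hk
    rw [ihget k (by omega)]
    by_cases hmem : (k : Int) ∈ xs
    · rw [if_pos hmem, if_pos (by simp [hmem])]
    · rw [if_neg hmem]
      by_cases hkx : (k : Int) = x
      · have : k = x.toNat := by omega
        subst this
        rw [if_pos (by simp [hkx]), pvGetD_set_eq c lo (by omega)]
      · have : ¬ ((k : Int) ∈ x :: xs) := by simp [hkx, hmem]
        rw [if_neg this, pvGetD_set_ne c lo (by omega)]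

lemma pvFind?_filter_ne {ν : Type} (items : List (Int × ν)) (k k' : Int) :
    List.find? (fun p => p.1 == k') (items.filter (fun p => !(p.1 == k))) =
      if k' = k then none else List.find? (fun p => p.1 == k') items := by
  induction items with
  | nil => by_cases hk : k' = k <;> simp [hk]
  | cons p ps ih =>
    rw [List.filter_cons]
    by_cases hp : p.1 = k
    · rw [show (!(p.1 == k)) = false by simp [hp]]
      simp only [Bool.false_eq_true, if_neg (by exact fun h => h)]
      rw [ih]
      by_cases hk : k' = k
      · rw [if_pos hk, if_pos hk]
      · rw [if_neg hk, if_neg hk, List.find?_cons,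
          show (p.1 == k') = false by simp [hp, Ne.symm hk]]
    · rw [show (!(p.1 == k)) = true by simp [hp], if_pos rfl]
      by_cases hpk : p.1 = k'
      · have hne : ¬ (k' = k) := by rw [← hpk]; exact hp
        rw [if_neg hne, List.find?_cons, List.find?_cons, show (p.1 == k') = true by simp [hpk]]
      · rw [List.find?_cons, show (p.1 == k') = false by simp [hpk], ih]
        by_cases hk : k' = k
        · rw [if_pos hk, if_pos hk]
        · rw [if_neg hk, if_neg hk, List.find?_cons,
            show (p.1 == k') = false by simp [hpk]]

lemma pvDict_get?_erase {ν : Type} (d : PySem.Dict Int ν) (k k' : Int) :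
    (d.erase k).get? k' = if k' = k then none else d.get? k' := by
  show Option.map _ (List.find? _ (List.filter _ d.items)) = _
  rw [pvFind?_filter_ne]
  by_cases hk : k' = k
  · rw [if_pos hk, if_pos hk]; rfl
  · rw [if_neg hk, if_neg hk]; rfl

lemma pvDict_getD_erase {ν : Type} (d : PySem.Dict Int ν) (k k' : Int) (dflt : ν) :
    (d.erase k).getD k' dflt = if k' = k then dflt else d.getD k' dflt := by
  unfold PySem.Dict.getD
  rw [pvDict_get?_erase]
  by_cases hk : k' = k
  · rw [if_pos hk, if_pos hk]; rfl
  · rw [if_neg hk, if_neg hk]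

lemma pvFind?_map_pair (xs : List Int) (l : Int) :
    List.find? (fun p => p.1 == l) (xs.map (fun i => (i, ([i] : List Int)))) =
      if l ∈ xs then some (l, [l]) else none := by
  induction xs with
  | nil => simp
  | cons x xs ih =>
    by_cases hx : x = l
    · subst hx
      simp [List.find?_cons]
    · rw [List.map_cons, List.find?_cons, show ((x, ([x] : List Int)).1 == l) = false by simp [hx], ih]
      by_cases hl : l ∈ xs
      · rw [if_pos hl, if_pos (by simp [hl])]
      · rw [if_neg hl, if_neg (by simp [Ne.symm hx, hl])]

lemma pvMembers0_getD (N : Int) (l : Int) :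
    (((PySem.List.pyRange 0 (N+1) 1).foldl (fun d i => d.insert i [i]) PySem.Dict.empty :
        PySem.Dict Int (List Int)).getD l []) = if 0 ≤ l ∧ l < N+1 then [l] else [] := by
  have hfresh : ∀ a ∈ PySem.List.pyRange 0 (N+1) 1, (PySem.Dict.empty : PySem.Dict Int (List Int)).contains a = false := by
    intro a _
    simp [pysem]
  have hnodup : ((PySem.List.pyRange 0 (N+1) 1).map (fun i => i)).Nodup := by
    simpa using PySem.List.nodup_pyRange_one 0 (N+1)
  have hitems := PySem.Dict.items_foldl_insert_fresh (k := fun i => i) (v := fun i => ([i] : List Int))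
    (d := (PySem.Dict.empty : PySem.Dict Int (List Int))) (l := PySem.List.pyRange 0 (N+1) 1) hfresh hnodup
  show (Option.map _ (List.find? _ _)).getD _ = _
  rw [show ((PySem.List.pyRange 0 (N+1) 1).foldl (fun d i => d.insert i [i]) PySem.Dict.empty :
      PySem.Dict Int (List Int)).items = (PySem.List.pyRange 0 (N+1) 1).map (fun i => (i, ([i] : List Int))) from hitems]
  rw [pvFind?_map_pair]
  by_cases hl : l ∈ PySem.List.pyRange 0 (N+1) 1
  · rw [if_pos hl, if_pos (by simpa [PySem.List.mem_pyRange_one] using hl)]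
    rfl
  · rw [if_neg hl, if_neg (by simpa [PySem.List.mem_pyRange_one] using hl)]
    rfl

-- ---------- the joint loop invariant ----------

def pvInv (L : Nat) (a : List Int × PySem.Set Int)
    (b : List Int × PySem.Dict Int (List Int) × PySem.Set Int) : Prop :=
  a.1.length = L ∧ b.1.length = L ∧ pvForest a.1 ∧
  (∀ k, k < L → (pvRoot a.1 k : Int) = b.1.getD k 0) ∧
  (∀ l x, x ∈ b.2.1.getD l [] → 0 ≤ x ∧ x < (L : Int)) ∧
  (∀ l (k : Nat), k < L → (((k : Int) ∈ b.2.1.getD l []) ↔ b.1.getD k 0 = l)) ∧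
  (∀ c ∈ a.2, 0 ≤ c ∧ c < (L : Int)) ∧
  (∀ x, x ∈ b.2.2 ↔ ∃ c ∈ a.2, b.1.getD c.toNat 0 = x)

lemma pvStep_inv {L : Nat} {a b} {e : Int × Int} (hI : pvInv L a b)
    (h1 : 0 ≤ e.1) (h1' : e.1 < (L : Int)) (h2 : 0 ≤ e.2) (h2' : e.2 < (L : Int)) :
    pvInv L (pvStepA a e) (pvStepB b e) := by
  obtain ⟨p, cyc⟩ := a
  obtain ⟨comp, members, bad⟩ := b
  obtain ⟨haL, hbL, hF, hbr, hmr, hmi, hcr, hbad⟩ := hI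
  simp only at haL hbL hF hbr hmr hmi hcr hbad
  obtain ⟨n1, hn1e⟩ : ∃ n : Nat, e.1 = (n : Int) := ⟨e.1.toNat, (Int.toNat_of_nonneg h1).symm⟩
  obtain ⟨n2, hn2e⟩ : ∃ n : Nat, e.2 = (n : Int) := ⟨e.2.toNat, (Int.toNat_of_nonneg h2).symm⟩
  have hn1 : n1 < L := by omega
  have hn2 : n2 < L := by omega
  rcases pvFind_spec p.length p n1 hF (by omega) (by omega) with ⟨f1len, f1F, f1roots, f1ret⟩
  set s1 := pvFind p.length p (n1 : Int) with hs1
  rcases pvFind_spec s1.1.length s1.1 n2 f1F (by omega) (by omega) with ⟨f2len, f2F, f2roots, f2ret⟩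
  set s2 := pvFind s1.1.length s1.1 (n2 : Int) with hs2
  set ra := pvRoot p n1 with hra
  set rb := pvRoot p n2 with hrb
  have hs2len : s2.1.length = L := by omega
  have hroots2 : ∀ k, k < L → pvRoot s2.1 k = pvRoot p k := by
    intro k hk
    rw [f2roots k (by omega), f1roots k (by omega)]
  have hrb' : pvRoot s1.1 n2 = rb := f1roots n2 (by omega)
  have hcu' : PySem.List.pyGetD comp ((n1 : Nat) : Int) 0 = (ra : Int) := by
    rw [PySem.List.pyGetD_natCast, ← hbr n1 hn1]
  have hcv' : PySem.List.pyGetD comp ((n2 : Nat) : Int) 0 = (rb : Int) := by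
    rw [PySem.List.pyGetD_natCast, ← hbr n2 hn2]
  simp only [pvStepA, pvStepB, hn1e, hn2e]
  rw [← hs1, ← hs2]
  simp only [f1ret, f2ret, hrb', hcu', hcv']
  by_cases heq : ra = rb
  · -- equal roots: A records a cycle, B records a bad label
    rw [if_neg (by simp [heq]), if_pos (by exact_mod_cast heq)]
    refine ⟨by simpa using hs2len, hbL, f2F, ?_, hmr, hmi, ?_, ?_⟩
    · intro k hk
      rw [hroots2 k hk]
      exact hbr k hk
    · intro c hc
      rcases (PySem.Set.mem_add _ _ _).mp hc with hc' | hc'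
      · rcases (PySem.Set.mem_add _ _ _).mp hc' with hc'' | hc''
        · exact hcr c hc''
        · subst hc''; omega
      · subst hc'; omega
    · intro x
      constructor
      · intro hx
        rcases (PySem.Set.mem_add _ _ _).mp hx with hx' | hx'
        · rcases (hbad x).mp hx' with ⟨c, hc, hcx⟩
          exact ⟨c, (PySem.Set.mem_add _ _ _).mpr (Or.inl ((PySem.Set.mem_add _ _ _).mpr (Or.inl hc))), hcx⟩
        · refine ⟨(n1 : Int), (PySem.Set.mem_add _ _ _).mpr (Or.inl ((PySem.Set.mem_add _ _ _).mpr (Or.inr rfl))), ?_⟩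
          rw [Int.toNat_natCast, ← hbr n1 hn1, hx']
      · rintro ⟨c, hc, hcx⟩
        rcases (PySem.Set.mem_add _ _ _).mp hc with hc' | hc'
        · rcases (PySem.Set.mem_add _ _ _).mp hc' with hc'' | hc''
          · exact (PySem.Set.mem_add _ _ _).mpr (Or.inl ((hbad x).mpr ⟨c, hc'', hcx⟩))
          · subst hc''
            rw [Int.toNat_natCast, ← hbr n1 hn1] at hcx
            exact (PySem.Set.mem_add _ _ _).mpr (Or.inr hcx.symm)
        · subst hc'
          rw [Int.toNat_natCast, ← hbr n2 hn2] at hcx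
          exact (PySem.Set.mem_add _ _ _).mpr (Or.inr (by rw [← hcx]; exact_mod_cast heq.symm))
  · -- distinct roots: A unions, B relabels
    rw [if_pos (by simp; exact_mod_cast heq), if_neg (by exact_mod_cast heq)]
    rcases pvUnion_spec f2F (a := n1) (b := n2) (by omega) (by omega)
      (by rw [hroots2 n1 hn1, hroots2 n2 hn2]; exact heq) with ⟨ulen, uF, uroots⟩
    set u := pvUnion s2.1 (n1 : Int) (n2 : Int) with hu
    have hua : pvRoot s2.1 n1 = ra := hroots2 n1 hn1
    have hub : pvRoot s2.1 n2 = rb := hroots2 n2 hn2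
    have huroots : ∀ k, k < L → pvRoot u k = if pvRoot p k = max ra rb then min ra rb else pvRoot p k := by
      intro k hk
      rw [uroots k (by omega), hua, hub, hroots2 k hk]
    set lo : Int := if (ra : Int) < (rb : Int) then (ra : Int) else (rb : Int) with hlo
    set hi : Int := if (ra : Int) < (rb : Int) then (rb : Int) else (ra : Int) with hhi
    have hlo' : lo = ((min ra rb : Nat) : Int) := by
      rw [hlo]
      by_cases h : ra < rb
      · rw [if_pos (by exact_mod_cast h), show min ra rb = ra by omega]
      · rw [if_neg (by exact_mod_cast h), show min ra rb = rb by omega]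
    have hhi' : hi = ((max ra rb : Nat) : Int) := by
      rw [hhi]
      by_cases h : ra < rb
      · rw [if_pos (by exact_mod_cast h), show max ra rb = rb by omega]
      · rw [if_neg (by exact_mod_cast h), show max ra rb = ra by omega]
    have hlohi : lo ≠ hi := by
      rw [hlo', hhi']
      intro hcon
      have : min ra rb = max ra rb := by exact_mod_cast hcon
      omega
    set moved := members.getD hi [] with hmoved
    have hmvr : ∀ x ∈ moved, 0 ≤ x ∧ x < (comp.length : Int) := by
      intro x hx
      rw [hbL]
      exact hmr hi x hx
    rcases pvRelabel_spec moved comp lo hmvr with ⟨rlen, rget⟩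
    set comp' := moved.foldl (fun c x => PySem.List.pySetD c x lo) comp with hcomp'
    have hcomp'get : ∀ k : Nat, k < L →
        comp'.getD k 0 = if comp.getD k 0 = hi then lo else comp.getD k 0 := by
      intro k hk
      rw [rget k (by omega)]
      by_cases hm : (k : Int) ∈ moved
      · rw [if_pos hm, if_pos ((hmi hi k hk).mp hm)]
      · rw [if_neg hm, if_neg (fun h => hm ((hmi hi k hk).mpr h))]
    have hbridge' : ∀ k, k < L → (pvRoot u k : Int) = comp'.getD k 0 := by
      intro k hk
      rw [huroots k hk, hcomp'get k hk, ← hbr k hk]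
      by_cases h : pvRoot p k = max ra rb
      · rw [if_pos h, if_pos (by rw [h, hhi']), hlo']
      · rw [if_neg h, if_neg (by rw [hhi']; intro hcon; exact h (by exact_mod_cast hcon))]
    have hm'get : ∀ l : Int, ((members.modify lo [] (fun x => x ++ moved)).erase hi).getD l [] =
        if l = hi then [] else if l = lo then members.getD lo [] ++ moved else members.getD l [] := by
      intro l
      rw [pvDict_getD_erase]
      by_cases hl : l = hi
      · rw [if_pos hl, if_pos hl]
      · rw [if_neg hl, if_neg hl, PySem.Dict.getD_modify]
    refine ⟨by simpa using ulen.trans hs2len, by simpa [hbL] using rlen, uF, hbridge', ?_, ?_, hcr, ?_⟩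
    · -- member lists stay within range
      intro l x hx
      rw [hm'get l] at hx
      by_cases hl : l = hi
      · rw [if_pos hl] at hx; simp at hx
      · rw [if_neg hl] at hx
        by_cases hl' : l = lo
        · rw [if_pos hl'] at hx
          rcases List.mem_append.mp hx with hx' | hx'
          · exact hmr lo x hx'
          · exact hmr hi x hx'
        · rw [if_neg hl'] at hx
          exact hmr l x hx
    · -- member lists describe comp'
      intro l k hk
      rw [hm'get l, hcomp'get k hk]
      by_cases hl : l = hi
      · rw [if_pos hl]
        constructor
        · intro hx; simp at hx
        · intro hx
          rw [hl] at hx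
          exfalso
          by_cases hch : comp.getD k 0 = hi
          · rw [if_pos hch] at hx; exact hlohi hx
          · rw [if_neg hch] at hx; exact hch hx
      · rw [if_neg hl]
        by_cases hl' : l = lo
        · rw [if_pos hl', List.mem_append]
          constructor
          · rintro (hx' | hx')
            · have hck := (hmi lo k hk).mp hx'
              rw [if_neg (fun h => hlohi (hck.symm.trans h)), hck, hl']
            · have hck := (hmi hi k hk).mp hx'
              rw [if_pos hck]
              exact hl'.symm
          · intro hx
            by_cases hch : comp.getD k 0 = hi
            · exact Or.inr ((hmi hi k hk).mpr hch)
            · rw [if_neg hch] at hx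
              exact Or.inl ((hmi lo k hk).mpr (hx.trans hl'))
        · rw [if_neg hl', hmi l k hk]
          by_cases hch : comp.getD k 0 = hi
          · rw [if_pos hch]
            constructor
            · intro hck; exact absurd (hck.symm.trans hch) hl
            · intro hlo; exact absurd hlo.symm hl'
          · rw [if_neg hch]
    · -- bad describes the labels of cyc under comp'
      intro x
      have hc' : ∀ c ∈ cyc, comp'.getD c.toNat 0 = if comp.getD c.toNat 0 = hi then lo else comp.getD c.toNat 0 := by
        intro c hc
        rcases hcr c hc with ⟨hc0, hc1⟩
        exact hcomp'get c.toNat (by omega)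
      by_cases hbh : PySem.Set.contains bad hi
      · rw [if_pos hbh]
        have hhibad : hi ∈ bad := (PySem.Set.contains_iff _ _).mp hbh
        constructor
        · intro hx
          rcases (PySem.Set.mem_add _ _ _).mp hx with hx' | hx'
          · rcases (hbad x).mp ((PySem.Set.mem_discard _ _ _).mp hx').1 with ⟨c, hc, hcx⟩
            have hxne : x ≠ hi := ((PySem.Set.mem_discard _ _ _).mp hx').2
            refine ⟨c, hc, ?_⟩
            rw [hc' c hc, if_neg (by rw [hcx]; exact hxne), hcx]
          · rcases (hbad hi).mp hhibad with ⟨c, hc, hcx⟩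
            refine ⟨c, hc, ?_⟩
            rw [hc' c hc, if_pos hcx, hx']
        · rintro ⟨c, hc, hcx⟩
          rw [hc' c hc] at hcx
          by_cases hch : comp.getD c.toNat 0 = hi
          · rw [if_pos hch] at hcx
            exact (PySem.Set.mem_add _ _ _).mpr (Or.inr hcx.symm)
          · rw [if_neg hch] at hcx
            refine (PySem.Set.mem_add _ _ _).mpr (Or.inl ((PySem.Set.mem_discard _ _ _).mpr ⟨(hbad x).mpr ⟨c, hc, hcx⟩, ?_⟩))
            rw [← hcx]; exact hch
      · rw [if_neg hbh]
        have hhinbad : hi ∉ bad := fun h => hbh ((PySem.Set.contains_iff _ _).mpr h)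
        constructor
        · intro hx
          rcases (hbad x).mp hx with ⟨c, hc, hcx⟩
          have hxne : x ≠ hi := by rintro rfl; exact hhinbad hx
          refine ⟨c, hc, ?_⟩
          rw [hc' c hc, if_neg (by rw [hcx]; exact hxne), hcx]
        · rintro ⟨c, hc, hcx⟩
          rw [hc' c hc] at hcx
          by_cases hch : comp.getD c.toNat 0 = hi
          · rw [if_pos hch] at hcx
            exact absurd ((hbad hi).mpr ⟨c, hc, hch⟩) hhinbad
          · rw [if_neg hch] at hcx
            exact (hbad x).mpr ⟨c, hc, hcx⟩

lemma pvFold_inv {L : Nat} (E : List (Int × Int)) {a b} (hI : pvInv L a b)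
    (hE : ∀ e ∈ E, 0 ≤ e.1 ∧ e.1 < (L : Int) ∧ 0 ≤ e.2 ∧ e.2 < (L : Int)) :
    pvInv L (E.foldl pvStepA a) (E.foldl pvStepB b) := by
  induction E generalizing a b with
  | nil => exact hI
  | cons e E ih =>
    simp only [List.foldl_cons]
    rcases hE e (by simp) with ⟨h1, h1', h2, h2'⟩
    exact ih (pvStep_inv hI h1 h1' h2 h2') (fun e' he' => hE e' (by simp [he']))

-- ---------- A's second pass ----------

lemma pvSecondPass :
    ∀ (ns : List Int) (p : List Int) (acc : List Int), pvForest p →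
      (∀ n ∈ ns, 0 ≤ n ∧ n < (p.length : Int)) →
      (ns.foldl (fun (acc : List Int × List Int) n =>
          let s := pvFind acc.1.length acc.1 n
          (s.1, acc.2 ++ [s.2])) (p, acc)).2
        = acc ++ ns.map (fun n => (pvRoot p n.toNat : Int)) := by
  intro ns
  induction ns with
  | nil => intro p acc _ _; simp
  | cons n ns ih =>
    intro p acc hF hb
    rcases hb n (by simp) with ⟨hn0, hn1⟩
    obtain ⟨m, hm⟩ : ∃ m : Nat, n = (m : Int) := ⟨n.toNat, (Int.toNat_of_nonneg hn0).symm⟩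
    have hmlt : m < p.length := by omega
    rcases pvFind_spec p.length p m hF hmlt hmlt with ⟨flen, fF, froots, fret⟩
    simp only [List.foldl_cons, hm, fret]
    have hb' : ∀ x ∈ ns, 0 ≤ x ∧ x < (((pvFind p.length p (m : Int)).1).length : Int) := by
      intro x hx
      rw [flen]
      exact hb x (by simp [hx])
    rw [ih (pvFind p.length p (m : Int)).1 (acc ++ [(pvRoot p m : Int)]) fF hb']
    simp only [List.map_cons, Int.toNat_natCast, List.append_assoc, List.singleton_append]
    congr 1
    congr 1
    apply List.map_congr_left
    intro x hx
    rcases hb x (by simp [hx]) with ⟨hx0, hx1⟩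
    rw [froots x.toNat (by omega)]

-- ---------- initial state ----------

lemma pvRange_getD (N : Int) {k : Nat} (hk : k < (PySem.List.pyRange 0 (N+1) 1).length) :
    (PySem.List.pyRange 0 (N+1) 1).getD k 0 = (k : Int) := by
  rw [List.getD_eq_getElem?_getD, List.getElem?_eq_getElem hk]
  simp [PySem.List.getElem_pyRange_one]

lemma pvInv_init (N : Int) : pvInv (PySem.List.pyRange 0 (N+1) 1).length
    (PySem.List.pyRange 0 (N+1) 1, PySem.Set.empty)
    (PySem.List.pyRange 0 (N+1) 1,
     (PySem.List.pyRange 0 (N+1) 1).foldl (fun d i => d.insert i [i]) PySem.Dict.empty,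
     PySem.Set.empty) := by
  have hlen : (PySem.List.pyRange 0 (N+1) 1).length = (N+1).toNat := by
    rw [PySem.List.length_pyRange_one]
    congr 1
    omega
  have hF : pvForest (PySem.List.pyRange 0 (N+1) 1) := by
    intro k hk
    rw [pvRange_getD N hk]
    omega
  refine ⟨rfl, rfl, hF, ?_, ?_, ?_, ?_, ?_⟩
  · intro k hk
    rw [pvRoot_eq hF hk, if_pos (pvRange_getD N hk), pvRange_getD N hk]
  · intro l x hx
    rw [pvMembers0_getD] at hx
    by_cases hc : 0 ≤ l ∧ l < N+1
    · rw [if_pos hc] at hx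
      rcases List.mem_singleton.mp hx with rfl
      constructor
      · exact hc.1
      · rw [hlen]; omega
    · rw [if_neg hc] at hx
      simp at hx
  · intro l k hk
    rw [pvMembers0_getD, pvRange_getD N hk]
    rw [hlen] at hk
    by_cases hc : 0 ≤ l ∧ l < N+1
    · rw [if_pos hc, List.mem_singleton]
    · rw [if_neg hc]
      constructor
      · intro hx; simp at hx
      · intro hx
        exfalso
        apply hc
        constructor
        · omega
        · omega
  · intro c hc
    simp [PySem.Set.empty] at hc
  · intro x
    constructor
    · intro hx; simp [PySem.Set.empty] at hx
    · rintro ⟨c, hc, _⟩; simp [PySem.Set.empty] at hc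

-- ===== VERDICT (by name: the statement is the Claim_ definition above) =====
theorem solution_spec : Claim_equal_solution := by
  intro seq N M E _ hPre
  show solution seq N M E = solution_alt seq N M E
  simp only [solution, solution_alt]
  set R := PySem.List.pyRange 0 (N+1) 1 with hR
  set L := R.length with hLdef
  have hlenL : L = (N+1).toNat := by
    rw [hLdef, hR, PySem.List.length_pyRange_one]
    congr 1
    omega
  have hE : ∀ e ∈ E, 0 ≤ e.1 ∧ e.1 < (L : Int) ∧ 0 ≤ e.2 ∧ e.2 < (L : Int) := by
    intro e he
    rcases hPre e he with ⟨a1, a2, a3, a4⟩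
    exact ⟨a1, by omega, a3, by omega⟩
  have hInv := pvFold_inv E (pvInv_init N) hE
  set stA := E.foldl pvStepA (R, PySem.Set.empty) with hstA
  set stB := E.foldl pvStepB (R, R.foldl (fun d i => d.insert i [i]) PySem.Dict.empty, PySem.Set.empty) with hstB
  obtain ⟨haL, hbL, hFa, hbr, hmr, hmi, hcr, hbad⟩ := hInv
  rw [← hR] at haL hbL hbr hmr hmi hcr
  rw [← hLdef] at haL hbL hbr hmr hmi hcr
  have hsp := pvSecondPass R stA.1 [] hFa (by
    intro n hn
    rcases PySem.List.mem_pyRange_one.mp hn with ⟨hn0, hn1⟩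
    rw [haL]
    constructor
    · exact hn0
    · omega)
  set parents2 := (R.foldl (fun (acc : List Int × List Int) n =>
      let s := pvFind acc.1.length acc.1 n
      (s.1, acc.2 ++ [s.2])) (stA.1, ([] : List Int))).2 with hp2
  have hp2eq : parents2 = stB.1 := by
    rw [hsp, List.nil_append]
    apply List.ext_getElem
    · simp [List.length_map, hbL, hLdef]
    · intro k h1 h2
      rw [List.getElem_map]
      have hkL : k < L := by
        simpa [hLdef] using h1
      have hRk : R[k]'(by omega) = (k : Int) := by
        simp only [hR]
        rw [PySem.List.getElem_pyRange_one]
        omega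
      rw [hRk, Int.toNat_natCast]
      have hb := hbr k hkL
      rw [hb, List.getD_eq_getElem stB.1 0 h2]
  have hcontains : ∀ x, (PySem.Set.ofList (stA.2.map (fun cn => PySem.List.pyGetD stB.1 cn 0))).contains x = stB.2.2.contains x := by
    intro x
    have hmemL : x ∈ PySem.Set.ofList (stA.2.map (fun cn => PySem.List.pyGetD stB.1 cn 0)) ↔ x ∈ stB.2.2 := by
      rw [PySem.Set.mem_ofList, List.mem_map]
      constructor
      · rintro ⟨cn, hcn, hval⟩
        rcases hcr cn hcn with ⟨c0, c1⟩
        refine (hbad x).mpr ⟨cn, hcn, ?_⟩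
        rw [← hval, ← Int.toNat_of_nonneg c0, PySem.List.pyGetD_natCast, Int.toNat_natCast]
      · intro hx
        rcases (hbad x).mp hx with ⟨cn, hcn, hval⟩
        rcases hcr cn hcn with ⟨c0, c1⟩
        refine ⟨cn, hcn, ?_⟩
        rw [← Int.toNat_of_nonneg c0, PySem.List.pyGetD_natCast]
        exact hval
    by_cases hx : x ∈ stB.2.2
    · rw [(PySem.Set.contains_iff _ _).mpr hx, (PySem.Set.contains_iff _ _).mpr (hmemL.mpr hx)]
    · rw [Bool.eq_false_iff.mpr (fun h => hx ((PySem.Set.contains_iff _ _).mp h)),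
        Bool.eq_false_iff.mpr (fun h => hx (hmemL.mp ((PySem.Set.contains_iff _ _).mp h)))]
  have hfinal : PySem.Set.len (PySem.Set.diff (PySem.Set.ofList (PySem.List.slice parents2 (some 1) none))
        (PySem.Set.ofList (stA.2.map (fun cn => PySem.List.pyGetD parents2 cn 0))))
      = PySem.Set.len (PySem.Set.diff (PySem.Set.ofList (PySem.List.slice stB.1 (some 1) none)) stB.2.2) := by
    simp only [PySem.Set.diff, PySem.Set.len, hp2eq]
    rw [List.filter_congr (fun y _ => by rw [hcontains y])]
  rw [hfinal]
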